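-- pv_equiv track=rewrite | github.com/Emoty-9s/VQGRS | fmp_universe_fetch.py | _rate_limit_headers
-- ===== SOURCE A (Python) =====
-- from typing import Any, Dict, List, Optional, Set, Tuple
--
-- def _rate_limit_headers(headers: Any) -> Dict[str, str]:
--     """Rate-limit 관련 헤더만 추출. 키는 소문자, 값은 문자열. apikey 포함 시 노출 안 함."""
--     out: Dict[str, str] = {}
--     if not headers:
--         return {}
--     try:
--         h = dict(headers) if not isinstance(headers, dict) else headers
--     except Exception:
--         return {}
--     for name in ["Retry-After", "X-RateLimit-Remaining", "X-RateLimit-Reset", "X-RateLimit-Limit", "Limit"]: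
--         for k, v in h.items():
--             if k and v is not None and name.lower() == str(k).lower():
--                 out[name] = str(v).strip()
--                 break
--     return out
-- ===== SOURCE B (Python) =====
-- _RL_NAMES = ["Retry-After", "X-RateLimit-Remaining", "X-RateLimit-Reset", "X-RateLimit-Limit", "Limit"]
--
-- def _rate_limit_headers(headers):
--     """Index-first variant: one pass over the headers builds a lowercase index
--     (first match wins), then the fixed name list is resolved against it."""
--     if not headers:
--         return {}
--     try:
--         h = dict(headers) if not isinstance(headers, dict) else headers
--     except Exception:
--         return {}
--     idx = {}
--     for k, v in h.items():
--         if k and v is not None: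
--             kl = str(k).lower()
--             if kl not in idx:
--                 idx[kl] = str(v).strip()
--     out = {}
--     for name in _RL_NAMES:
--         nl = name.lower()
--         if nl in idx:
--             out[name] = idx[nl]
--     return out
-- ===== Notes on version B (the rewrite author's own statement) =====
-- stated objective: alternative
-- what changed: Replaces the nested name-by-name rescans of the headers with a single pass that builds a lowercase first-match-wins index, followed by one lookup per fixed name.
import Mathlib
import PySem

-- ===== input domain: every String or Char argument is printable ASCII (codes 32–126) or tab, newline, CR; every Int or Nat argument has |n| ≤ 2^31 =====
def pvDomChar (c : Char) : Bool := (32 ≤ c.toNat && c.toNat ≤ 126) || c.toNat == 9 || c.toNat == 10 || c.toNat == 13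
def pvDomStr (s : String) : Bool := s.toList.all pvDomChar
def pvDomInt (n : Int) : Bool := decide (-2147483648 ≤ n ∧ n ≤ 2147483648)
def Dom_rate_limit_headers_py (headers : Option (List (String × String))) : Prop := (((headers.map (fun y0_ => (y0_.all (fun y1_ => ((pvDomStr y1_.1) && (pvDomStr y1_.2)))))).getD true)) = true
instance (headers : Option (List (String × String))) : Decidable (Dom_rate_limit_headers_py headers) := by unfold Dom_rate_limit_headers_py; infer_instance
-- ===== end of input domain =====

-- B builds a lowercase first-match-wins index in one pass and resolves each fixed name
-- against it, instead of A's rescanning of the header dict for every name (alternative).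
-- ===== PORT A =====
-- the fixed list of rate-limit header names (shared constant of both Pythons)
def pvNames : List String :=
  ["Retry-After", "X-RateLimit-Remaining", "X-RateLimit-Reset", "X-RateLimit-Limit", "Limit"]

-- the inner 'for k, v in h.items(): … break' scan of A (v is a String here, never None)
def pvFind (items : List (String × String)) (name : String) : Option (String × String) :=
  match items with
  | [] => none
  | (k, v) :: rest =>
    if k ≠ "" ∧ PySem.Str.lower name = PySem.Str.lower k then some (k, v)
    else pvFind rest name

def rate_limit_headers_py (headers : Option (List (String × String))) : List (String × String) :=
  match headers with
  | none => []
  | some hs =>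
    if hs.isEmpty then []
    else
      -- h = dict(headers)
      let h : PySem.Dict String String :=
        hs.foldl (fun d kv => d.insert kv.1 kv.2) PySem.Dict.empty
      (pvNames.foldl (fun out name =>
        match pvFind h.items name with
        | some (_, v) => out.insert name (PySem.Str.strip v)
        | none => out) PySem.Dict.empty).items

-- ===== PORT B =====
-- one step of B's indexing loop: insert lowercased key only if absent
def pvIdxStep (idx : PySem.Dict String String) (kv : String × String) : PySem.Dict String String :=
  if kv.1 ≠ "" then
    if idx.contains (PySem.Str.lower kv.1) then idx
    else idx.insert (PySem.Str.lower kv.1) (PySem.Str.strip kv.2)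
  else idx

def rate_limit_headers_py_alt (headers : Option (List (String × String))) : List (String × String) :=
  match headers with
  | none => []
  | some hs =>
    if hs.isEmpty then []
    else
      let h : PySem.Dict String String :=
        hs.foldl (fun d kv => d.insert kv.1 kv.2) PySem.Dict.empty
      let idx : PySem.Dict String String := h.items.foldl pvIdxStep PySem.Dict.empty
      (pvNames.foldl (fun out name =>
        match idx.get? (PySem.Str.lower name) with
        | some val => out.insert name val
        | none => out) PySem.Dict.empty).items

-- ===== PRECONDITION & SPEC =====
def Spec_rate_limit_headers_py (headers : Option (List (String × String))) (out : List (String × String)) : Prop := out = rate_limit_headers_py_alt headers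
instance (headers : Option (List (String × String))) (out : List (String × String)) : Decidable (Spec_rate_limit_headers_py headers out) := by unfold Spec_rate_limit_headers_py; infer_instance

-- ===== CLAIM (what is proved, stated in full; the proofs are below) =====
def Claim_equal_rate_limit_headers_py : Prop := ∀ (headers : Option (List (String × String))), Dom_rate_limit_headers_py headers → Spec_rate_limit_headers_py headers (rate_limit_headers_py headers)

-- ===== LEMMAS AND PROOFS =====

-- pvFind on a cons, as a rewrite equation
theorem pvFind_cons (k v name : String) (rest : List (String × String)) :
    pvFind ((k, v) :: rest) name =
      (if k ≠ "" ∧ PySem.Str.lower name = PySem.Str.lower k then some (k, v)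
       else pvFind rest name) := rfl

-- looking up lower(name) in the index built by B's loop equals A's first-match scan
theorem get?_foldl_pvIdxStep (l : List (String × String)) (acc : PySem.Dict String String)
    (name : String) :
    (l.foldl pvIdxStep acc).get? (PySem.Str.lower name) =
      ((acc.get? (PySem.Str.lower name)).orElse
        (fun _ => (pvFind l name).map (fun kv => PySem.Str.strip kv.2))) := by
  induction l generalizing acc with
  | nil => simp [pvFind]
  | cons kv rest ih =>
    obtain ⟨k, v⟩ := kv
    rw [List.foldl_cons, ih, pvFind_cons]
    simp only [pvIdxStep]
    by_cases hk : k = ""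
    · simp [hk]
    · rw [if_pos (show k ≠ "" from hk)]
      by_cases he : PySem.Str.lower name = PySem.Str.lower k
      · rw [if_pos (show k ≠ "" ∧ PySem.Str.lower name = PySem.Str.lower k from ⟨hk, he⟩)]
        by_cases hc : acc.contains (PySem.Str.lower k) = true
        · rw [if_pos hc]
          rcases ho : acc.get? (PySem.Str.lower k) with _ | w
          · have hcc := PySem.Dict.contains_eq_isSome_get? acc (PySem.Str.lower k)
            rw [ho, hc] at hcc
            simp at hcc
          · rw [he, ho]
            rfl
        · rw [if_neg hc]
          have hn : acc.get? (PySem.Str.lower name) = none := by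
            rw [he]
            exact (PySem.Dict.get?_eq_none_iff_contains acc _).mpr (by simpa using hc)
          have hi : (acc.insert (PySem.Str.lower k) (PySem.Str.strip v)).get?
              (PySem.Str.lower name) = some (PySem.Str.strip v) := by
            rw [he]
            exact PySem.Dict.get?_insert_self acc _ _
          rw [hn, hi]
          rfl
      · rw [if_neg (show ¬(k ≠ "" ∧ PySem.Str.lower name = PySem.Str.lower k) from fun hand => he hand.2)]
        by_cases hc : acc.contains (PySem.Str.lower k) = true
        · rw [if_pos hc]
        · rw [if_neg hc, PySem.Dict.get?_insert_of_ne acc _ he]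

-- the two per-name loop bodies agree once the index lookup is rewritten to the scan
theorem step_eq (items : List (String × String)) (out : PySem.Dict String String)
    (name : String) :
    (match pvFind items name with
     | some (_, v) => out.insert name (PySem.Str.strip v)
     | none => out) =
    (match (items.foldl pvIdxStep PySem.Dict.empty).get? (PySem.Str.lower name) with
     | some val => out.insert name val
     | none => out) := by
  rw [get?_foldl_pvIdxStep]
  rcases h : pvFind items name with _ | ⟨k, v⟩ <;> simp [Option.orElse, PySem.Dict.get?_empty]

-- ===== VERDICT (by name: the statement is the Claim_ definition above) =====
theorem rate_limit_headers_py_spec : Claim_equal_rate_limit_headers_py := by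
  intro headers _
  unfold Spec_rate_limit_headers_py rate_limit_headers_py rate_limit_headers_py_alt
  cases headers with
  | none => rfl
  | some hs =>
    by_cases h : hs.isEmpty
    · simp [h]
    · simp only [h, if_neg, Bool.false_eq_true, not_false_eq_true]
      congr 1
      exact PySem.List.foldl_congr_mem _ _ _ _ (fun out name _ => step_eq _ out name)
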